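-- pv_equiv track=rewrite | github.com/ocavue/leetcode | 630.course-schedule-iii.py | schedule_v3
-- ===== SOURCE A (Python) =====
-- from typing import List, Tuple, Dict
-- import heapq
--
-- def schedule_v3(courses: List[List[int]]):
--     courses.sort(key=lambda c: c[1])
--
--     heap: List[Tuple[int, int]] = []
--     used_days = 0
--
--     for cost, deadline in courses:
--         if used_days + cost <= deadline:
--             heapq.heappush(heap, (-cost, deadline))
--             used_days += cost
--         elif heap:
--             max_cost = -heap[0][0]
--             if max_cost > cost:
--                 heapq.heapreplace(heap, (-cost, deadline))
--                 used_days -= max_cost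
--                 used_days += cost
--     return len(heap)
-- ===== SOURCE B (Python) =====
-- def schedule_v3(courses):
--     courses.sort(key=lambda c: c[1])
--
--     chosen = []
--     used_days = 0
--
--     for cost, deadline in courses:
--         if used_days + cost <= deadline:
--             chosen.append(cost)
--             used_days += cost
--         elif chosen:
--             max_cost = max(chosen)
--             if max_cost > cost:
--                 chosen.remove(max_cost)
--                 chosen.append(cost)
--                 used_days += cost - max_cost
--     return len(chosen)
-- ===== Notes on version B (the rewrite author's own statement) =====
-- stated objective: simpler
-- what changed: Replaces the max-heap of (-cost, deadline) pairs with a plain list of chosen costs: the most expensive chosen course is found by max() and dropped with list.remove, so no heap and no sign-flipped tuples are maintained.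
import Mathlib
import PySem

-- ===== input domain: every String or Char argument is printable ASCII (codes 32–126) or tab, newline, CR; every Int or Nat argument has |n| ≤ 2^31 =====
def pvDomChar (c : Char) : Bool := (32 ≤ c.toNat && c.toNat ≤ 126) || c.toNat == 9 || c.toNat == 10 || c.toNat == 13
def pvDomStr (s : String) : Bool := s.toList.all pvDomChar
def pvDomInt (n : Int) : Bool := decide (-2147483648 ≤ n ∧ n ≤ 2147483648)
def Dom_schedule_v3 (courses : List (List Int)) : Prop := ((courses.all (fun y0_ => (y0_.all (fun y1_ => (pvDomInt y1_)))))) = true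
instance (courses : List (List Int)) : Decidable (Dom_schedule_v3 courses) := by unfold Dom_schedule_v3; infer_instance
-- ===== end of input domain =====

-- B keeps a plain list of chosen costs scanned by max() instead of A's heap of (-cost, deadline)
-- pairs: simpler state, no heap discipline. Both A and B sort `courses` in place (same mutation);
-- the equivalence proved here is about the return value.

-- ===== PORT A =====
-- heapq is a library call: the heap is modelled as a list kept ascending by the pair's first
-- component; the observables A uses — len(heap), heap[0][0] (the lexicographic minimum's first
-- component, ties in .1 leave .0 unchanged) and the popped root's multiset effect — are exact.
def pvHeapInsert (a : Int × Int) : List (Int × Int) → List (Int × Int)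
  | [] => [a]
  | b :: t => if a.1 ≤ b.1 then a :: b :: t else b :: pvHeapInsert a t

def pvStepA (st : List (Int × Int) × Int) (c : List Int) : List (Int × Int) × Int :=
  match c with
  | [cost, deadline] =>
    if st.2 + cost ≤ deadline then
      (pvHeapInsert (-cost, deadline) st.1, st.2 + cost)
    else
      match st.1 with
      | [] => st
      | (nc, _) :: t =>
        if -nc > cost then (pvHeapInsert (-cost, deadline) t, st.2 - (-nc) + cost)
        else st
  | _ => st  -- unpacking `cost, deadline` raises in Python; excluded by Pre_

def schedule_v3 (courses : List (List Int)) : Int :=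
  (((PySem.List.sorted courses (fun c => PySem.List.pyGetD c 1 0)).foldl
      pvStepA ([], 0)).1.length : Int)

-- ===== PORT B =====
-- `elif chosen: max_cost = max(chosen)` is rendered through max?: none exactly when chosen is empty.
def pvStepB (st : List Int × Int) (c : List Int) : List Int × Int :=
  match c with
  | [cost, deadline] =>
    if st.2 + cost ≤ deadline then
      (st.1 ++ [cost], st.2 + cost)
    else
      match PySem.List.max? st.1 (fun x => x) with
      | none => st
      | some m =>
        if m > cost then
          match PySem.List.remove? st.1 m with
          | some l => (l ++ [cost], st.2 + (cost - m))
          | none => st  -- unreachable: m ∈ chosen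
        else st
  | _ => st  -- unpacking raises in Python; excluded by Pre_

def schedule_v3_alt (courses : List (List Int)) : Int :=
  (((PySem.List.sorted courses (fun c => PySem.List.pyGetD c 1 0)).foldl
      pvStepB ([], 0)).1.length : Int)

-- ===== PRECONDITION & SPEC =====
-- Python A raises on any row not of length exactly 2 (IndexError in the sort key, or
-- ValueError unpacking `cost, deadline`); those inputs are excluded.
def Pre_schedule_v3 (courses : List (List Int)) : Prop := ∀ c ∈ courses, c.length = 2
instance (courses : List (List Int)) : Decidable (Pre_schedule_v3 courses) := by
  unfold Pre_schedule_v3; infer_instance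

def pvWitness_schedule_v3 : List (List Int) := [[5, 5], [4, 6], [2, 6]]

def Spec_schedule_v3 (courses : List (List Int)) (out : Int) : Prop := out = schedule_v3_alt courses
instance (courses : List (List Int)) (out : Int) : Decidable (Spec_schedule_v3 courses out) := by
  unfold Spec_schedule_v3; infer_instance

-- ===== CLAIM (what is proved, stated in full; the proofs are below) =====
def Claim_equal_schedule_v3 : Prop := ∀ (courses : List (List Int)), Dom_schedule_v3 courses → Pre_schedule_v3 courses → Spec_schedule_v3 courses (schedule_v3 courses)

-- ===== LEMMAS AND PROOFS =====

-- simulation relation: B's chosen list is (as a multiset) the costs stored (negated) in A's heap,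
-- and A's heap is ascending in its first component (so its head carries the maximal cost).
def pvInv (h : List (Int × Int)) (ch : List Int) : Prop :=
  (h.map (fun p => -p.1)).Perm ch ∧ h.Pairwise (fun x y => x.1 ≤ y.1)

theorem pvHeapInsert_perm (a : Int × Int) (l : List (Int × Int)) :
    (pvHeapInsert a l).Perm (a :: l) := by
  induction l with
  | nil => simp [pvHeapInsert]
  | cons b t ih =>
    simp only [pvHeapInsert]
    split
    · exact List.Perm.refl _
    · exact (ih.cons b).trans (List.Perm.swap a b t)

theorem pvHeapInsert_pairwise (a : Int × Int) (l : List (Int × Int))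
    (hl : l.Pairwise (fun x y => x.1 ≤ y.1)) :
    (pvHeapInsert a l).Pairwise (fun x y => x.1 ≤ y.1) := by
  induction l with
  | nil => simp [pvHeapInsert]
  | cons b t ih =>
    rcases List.pairwise_cons.1 hl with ⟨hb, ht⟩
    simp only [pvHeapInsert]
    split
    · rename_i hle
      refine List.pairwise_cons.2 ⟨?_, hl⟩
      intro y hy
      rcases List.mem_cons.1 hy with hy | hy
      · subst hy; exact hle
      · exact le_trans hle (hb y hy)
    · rename_i hgt
      refine List.pairwise_cons.2 ⟨?_, ih ht⟩
      intro y hy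
      have hmem := (pvHeapInsert_perm a t).mem_iff.1 hy
      rcases List.mem_cons.1 hmem with hy' | hy'
      · subst hy'; omega
      · exact hb y hy'

theorem pvStep_inv (h : List (Int × Int)) (ch : List Int) (u : Int) (c : List Int)
    (hinv : pvInv h ch) :
    pvInv (pvStepA (h, u) c).1 (pvStepB (ch, u) c).1 ∧
      (pvStepA (h, u) c).2 = (pvStepB (ch, u) c).2 := by
  obtain ⟨hperm, hsort⟩ := hinv
  match c with
  | [] => exact ⟨⟨hperm, hsort⟩, rfl⟩
  | [_] => exact ⟨⟨hperm, hsort⟩, rfl⟩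
  | _ :: _ :: _ :: _ => exact ⟨⟨hperm, hsort⟩, rfl⟩
  | [cost, deadline] =>
    simp only [pvStepA, pvStepB]
    by_cases hfit : u + cost ≤ deadline
    · simp only [if_pos hfit]
      refine ⟨⟨?_, pvHeapInsert_pairwise _ _ hsort⟩, by trivial⟩
      have h1 := ((pvHeapInsert_perm (-cost, deadline) h).map (fun p => -p.1))
      simp only [List.map_cons, neg_neg] at h1
      exact h1.trans ((hperm.cons cost).trans (List.perm_append_singleton cost ch).symm)
    · simp only [if_neg hfit]
      match h, hperm, hsort with
      | [], hperm, hsort =>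
        have hch : ch = [] := hperm.symm.eq_nil
        subst hch
        simp [PySem.List.max?, pvInv]
      | (nc, d0) :: t, hperm, hsort =>
        -- B's max(chosen) is the negation of the heap head's first component
        have hchne : ch ≠ [] := by
          intro he; subst he
          exact absurd hperm.eq_nil (by simp)
        obtain ⟨m, hm⟩ : ∃ m, PySem.List.max? ch (fun x => x) = some m := by
          cases he : PySem.List.max? ch (fun x => x) with
          | none => exact absurd ((PySem.List.max?_eq_none_iff ch (fun x => x)).1 he) hchne
          | some m => exact ⟨m, rfl⟩
        have hmmem : m ∈ ch := PySem.List.max?_mem hm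
        have hmmax : ∀ y ∈ ch, y ≤ m := fun y hy => PySem.List.max?_isMax hm y hy
        have hhead : -nc ∈ ch := hperm.subset (by simp)
        have hmle : m ≤ -nc := by
          have := hperm.symm.subset hmmem
          simp only [List.mem_map] at this
          obtain ⟨p, hp, hpe⟩ := this
          have : nc ≤ p.1 := by
            rcases List.mem_cons.1 hp with hp | hp
            · subst hp; rfl
            · exact (List.pairwise_cons.1 hsort).1 p hp
          omega
        have hme : m = -nc := le_antisymm hmle (hmmax _ hhead)
        subst hme
        rw [hm]
        dsimp only
        by_cases hgt : -nc > cost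
        · simp only [if_pos hgt]
          rw [PySem.List.remove?_eq_some_erase ch (-nc) hhead]
          dsimp only
          refine ⟨⟨?_, pvHeapInsert_pairwise _ _ (List.pairwise_cons.1 hsort).2⟩, by omega⟩
          have htperm : (t.map (fun p => -p.1)).Perm (ch.erase (-nc)) := by
            have h2 : ch.Perm (-nc :: ch.erase (-nc)) := List.perm_cons_erase hhead
            have h3 : ((-nc) :: t.map (fun p => -p.1)).Perm ((-nc) :: ch.erase (-nc)) := by
              have := hperm.trans h2
              simpa using this
            exact h3.cons_inv
          have h1 := ((pvHeapInsert_perm (-cost, deadline) t).map (fun p => -p.1))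
          simp only [List.map_cons, neg_neg] at h1
          exact h1.trans ((htperm.cons cost).trans
            (List.perm_append_singleton cost (ch.erase (-nc))).symm)
        · rw [if_neg hgt, if_neg hgt]
          exact ⟨⟨hperm, hsort⟩, rfl⟩

theorem pvLoop (l : List (List Int)) (h : List (Int × Int)) (ch : List Int) (u : Int)
    (hinv : pvInv h ch) :
    (l.foldl pvStepA (h, u)).1.length = (l.foldl pvStepB (ch, u)).1.length := by
  induction l generalizing h ch u with
  | nil =>
    have := hinv.1.length_eq
    simpa using this
  | cons c rest ih =>
    have hs := pvStep_inv h ch u c hinv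
    rw [List.foldl_cons, List.foldl_cons,
        (by rfl : pvStepA (h, u) c = ((pvStepA (h, u) c).1, (pvStepA (h, u) c).2)),
        (by rfl : pvStepB (ch, u) c = ((pvStepB (ch, u) c).1, (pvStepB (ch, u) c).2)),
        hs.2]
    exact ih _ _ _ hs.1

-- ===== VERDICT (by name: the statement is the Claim_ definition above) =====
theorem schedule_v3_spec : Claim_equal_schedule_v3 := by
  intro courses _ _
  unfold Spec_schedule_v3 schedule_v3 schedule_v3_alt
  have := pvLoop (PySem.List.sorted courses (fun c => PySem.List.pyGetD c 1 0)) [] [] 0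
    ⟨by simp, by simp⟩
  exact_mod_cast this
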